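-- pv_equiv track=rewrite | github.com/arsenii555/Smarthome | main.py | base64_to_bytes
-- ===== SOURCE A (Python) =====
-- def base64_to_bytes(base):
--     base = base.replace("+", "-").replace("/", "_")
--     count = ((8 - len(base) % 8) % 8)
--     dic2 = dict()
--     alfabet = "ABCDEFGHIJKLMNOPQRSTUVWXYZabcdefghijklmnopqrstuvwxyz0123456789-_"
--     for i in range(len(alfabet)):
--         dic2[alfabet[i]] = hex(i)[2:]
--     ans_bin = ""
--     for i in base:
--         if i != "=":
--             ans_bin += ("0" * (6 - len(bin(int(dic2[i], 16))[2:])) + bin(int(dic2[i], 16))[2:])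
--     ans_bin += "0" * count * 2
--     ans_bin = ans_bin[:len(ans_bin) - count * 2]
--     res = []
--     respart = ""
--     for i in range(len(ans_bin)):
--         respart += ans_bin[i]
--         if (i + 1) % 8 == 0:
--             res.append(respart)
--             respart = ""
--     for i in range(len(res)):
--         res[i] = hex(int(res[i], 2))[2:]
--         if len(res[i]) < 2:
--             res[i] = "0" + res[i]
--     return res
-- ===== SOURCE B (Python) =====
-- def base64_to_bytes(base):
--     alphabet = "ABCDEFGHIJKLMNOPQRSTUVWXYZabcdefghijklmnopqrstuvwxyz0123456789-_"
--     index = {c: i for i, c in enumerate(alphabet)}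
--     index["+"] = 62
--     index["/"] = 63
--     acc = 0
--     bits = 0
--     out = []
--     for ch in base:
--         if ch == "=":
--             continue
--         acc = acc * 64 + index[ch]
--         bits += 6
--         if bits >= 8:
--             bits -= 8
--             out.append(format(acc // 2 ** bits, "02x"))
--             acc = acc % 2 ** bits
--     return out
-- ===== Notes on version B (the rewrite author's own statement) =====
-- stated objective: faster
-- what changed: B replaces A's four passes (per-char 6-bit binary string concatenation, pad/truncate arithmetic, regrouping the bit string into 8-char chunks, chunk-to-hex conversion) by a single pass with a small integer bit accumulator and bit counter that emits each byte as soon as 8 bits are available.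
import Mathlib
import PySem

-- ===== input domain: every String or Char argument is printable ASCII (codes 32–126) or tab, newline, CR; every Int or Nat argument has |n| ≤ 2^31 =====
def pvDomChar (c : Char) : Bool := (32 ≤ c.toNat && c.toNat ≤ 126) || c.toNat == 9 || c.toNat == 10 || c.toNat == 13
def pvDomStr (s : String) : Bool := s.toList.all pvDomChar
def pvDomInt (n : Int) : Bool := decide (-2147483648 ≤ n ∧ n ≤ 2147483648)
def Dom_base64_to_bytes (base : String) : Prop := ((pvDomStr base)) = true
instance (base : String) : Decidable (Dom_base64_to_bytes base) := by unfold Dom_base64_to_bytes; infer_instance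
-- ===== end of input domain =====

-- B replaces A's binary-string building, padding arithmetic and regrouping passes by a single
-- pass with an integer bit accumulator (measured faster; return value proved equal on Pre_).

-- ===== PORT A =====

def pvAlphabet : String := "ABCDEFGHIJKLMNOPQRSTUVWXYZabcdefghijklmnopqrstuvwxyz0123456789-_"

-- hex digit character (exact for d < 16, the only values reached)
def pvHexDigit (d : Nat) : Char := if d < 10 then Char.ofNat (48 + d) else Char.ofNat (87 + d)

-- digits of hex(n) for n > 0, with explicit fuel (fuel = n suffices); [] for n = 0
def pvHexGo : Nat → Nat → List Char
  | _, 0 => []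
  | 0, _ + 1 => []
  | f + 1, n + 1 => pvHexGo f ((n + 1) / 16) ++ [pvHexDigit ((n + 1) % 16)]

-- hex(n)[2:] for n ≥ 0 (exact on the nonnegative values reached here)
def pvHexChars (n : Nat) : List Char := if n = 0 then ['0'] else pvHexGo n n

def pvBinGo : Nat → Nat → List Char
  | _, 0 => []
  | 0, _ + 1 => []
  | f + 1, n + 1 => pvBinGo f ((n + 1) / 2) ++ [if (n + 1) % 2 = 1 then '1' else '0']

-- bin(n)[2:] for n ≥ 0 (exact on the nonnegative values reached here)
def pvBinChars (n : Nat) : List Char := if n = 0 then ['0'] else pvBinGo n n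

-- dic2: built by A before its main loop; it does not depend on the input, hoisted to a constant
def pvDic2 : PySem.Dict Char String :=
  (PySem.List.pyRange 0 (PySem.Str.len pvAlphabet) 1).foldl
    (fun d i => d.insert (PySem.List.pyGetD pvAlphabet.toList i ' ') (String.ofList (pvHexChars i.toNat)))
    PySem.Dict.empty
-- (i ranges over 0..63, so pyGetD's default and i.toNat are never off the Python path)

-- the body of A's first loop: "0"*(6-len(bin(int(dic2[i],16))[2:])) + bin(int(dic2[i],16))[2:]
-- (dict lookup dic2[i] raises KeyError for chars outside the alphabet: those inputs are outside Pre_)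
def pvABlock (c : Char) : List Char :=
  let v : Int := (PySem.Int.ofStrBase? (pvDic2.getD c "") 16).getD 0
  List.replicate (6 - (pvBinChars v.toNat).length) '0' ++ pvBinChars v.toNat

-- the body of A's grouping loop over enumerate(ans_bin) (i, ans_bin[i])
def pvAStep (st : List (List Char) × List Char) (p : Int × Char) : List (List Char) × List Char :=
  let rp := st.2 ++ [p.2]
  if PySem.Int.mod (p.1 + 1) 8 = 0 then (st.1 ++ [rp], []) else (st.1, rp)

-- the body of A's final loop: hex(int(r,2))[2:], left-padded with '0' to length 2
def pvConv (r : List Char) : String :=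
  let h := pvHexChars ((PySem.Int.ofCharsBase? r 2).getD 0).toNat
  String.ofList (if h.length < 2 then '0' :: h else h)

def base64_to_bytes (base : String) : List String :=
  let b := PySem.Str.replace (PySem.Str.replace base "+" "-") "/" "_"
  let count : Int := PySem.Int.mod (8 - PySem.Int.mod (PySem.Str.len b) 8) 8
  let ansBin : List Char := b.toList.foldl (fun s c => if c ≠ '=' then s ++ pvABlock c else s) []
  let ansBin2 := ansBin ++ List.replicate (count.toNat * 2) '0'
  let ansBin3 := PySem.List.slice ansBin2 none (some ((ansBin2.length : Int) - count * 2))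
  let res := ((PySem.List.enumerate ansBin3 0).foldl pvAStep ([], [])).1
  res.map pvConv

-- ===== PORT B =====

-- index: {c: i for i, c in enumerate(alphabet)}; then index["+"] = 62; index["/"] = 63
def pvIndex : PySem.Dict Char Int :=
  (((PySem.List.enumerate pvAlphabet.toList 0).foldl (fun d p => d.insert p.2 p.1)
      PySem.Dict.empty).insert '+' 62).insert '/' 63

-- format(x, '02x') for x ≥ 0 (the only values reached)
def pvHex2 (x : Int) : String := String.ofList (PySem.Chars.zfill (pvHexChars x.toNat) 2)

-- loop body of B for a non-'=' char whose table value is v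
def pvBStep (st : Int × Int × List String) (v : Int) : Int × Int × List String :=
  let acc := st.1 * 64 + v
  let bits := st.2.1 + 6
  if 8 ≤ bits then
    (PySem.Int.mod acc (2 ^ (bits - 8).toNat), bits - 8,
      st.2.2 ++ [pvHex2 (PySem.Int.floordiv acc (2 ^ (bits - 8).toNat))])
  else (acc, bits, st.2.2)

def base64_to_bytes_alt (base : String) : List String :=
  -- index[ch] raises KeyError for chars outside the table: those inputs are outside Pre_
  (base.toList.foldl
    (fun st ch => if ch = '=' then st else pvBStep st (pvIndex.getD ch 0))
    ((0 : Int), (0 : Int), ([] : List String))).2.2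

-- ===== PRECONDITION & SPEC =====

def pvAllowed : List Char := ['A', 'B', 'C', 'D', 'E', 'F', 'G', 'H', 'I', 'J', 'K', 'L', 'M', 'N', 'O', 'P', 'Q', 'R', 'S', 'T', 'U', 'V', 'W', 'X', 'Y', 'Z', 'a', 'b', 'c', 'd', 'e', 'f', 'g', 'h', 'i', 'j', 'k', 'l', 'm', 'n', 'o', 'p', 'q', 'r', 's', 't', 'u', 'v', 'w', 'x', 'y', 'z', '0', '1', '2', '3', '4', '5', '6', '7', '8', '9', '-', '_', '+', '/', '=']

-- Pre_ excludes exactly the inputs with a character outside base64-url/standard alphabet plus '=',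
-- on which A raises KeyError (dic2[i]).
def Pre_base64_to_bytes (base : String) : Prop := (base.toList.all (fun c => pvAllowed.contains c)) = true
instance (base : String) : Decidable (Pre_base64_to_bytes base) := by
  unfold Pre_base64_to_bytes; infer_instance

def pvWitness_base64_to_bytes : String := "TWFu+/=="

def Spec_base64_to_bytes (base : String) (out : List String) : Prop := out = base64_to_bytes_alt base
instance (base : String) (out : List String) : Decidable (Spec_base64_to_bytes base out) := by
  unfold Spec_base64_to_bytes; infer_instance

-- ===== CLAIM (what is proved, stated in full; the proofs are below) =====
def Claim_equal_base64_to_bytes : Prop := ∀ (base : String), Dom_base64_to_bytes base → Pre_base64_to_bytes base → Spec_base64_to_bytes base (base64_to_bytes base)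

-- ===== LEMMAS AND PROOFS =====

-- bits as Bool lists: value of a big-endian bit list
def pvBtn (l : List Bool) : Nat := l.foldl (fun a b => 2 * a + (if b then 1 else 0)) 0

def pvBits6 (v : Nat) : List Bool :=
  [v.testBit 5, v.testBit 4, v.testBit 3, v.testBit 2, v.testBit 1, v.testBit 0]

def pvBitChar (b : Bool) : Char := if b then '1' else '0'

def pvRepl (c : Char) : Char := if c = '+' then '-' else if c = '/' then '_' else c

def pvChunks8 {α : Type} (l : List α) : List (List α) :=
  if _h : 8 ≤ l.length then l.take 8 :: pvChunks8 (l.drop 8) else []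
termination_by l.length
decreasing_by simp; omega

def pvVals (l : List Char) : List Nat :=
  (l.filter (fun c => !(c == '='))).map (fun c => pvAlphabet.toList.idxOf (pvRepl c))

def pvClosed (l : List Char) : List String :=
  (pvChunks8 ((pvVals l).flatMap pvBits6)).map (fun ch => pvHex2 ((pvBtn ch : Nat) : Int))


-- ---- Python str.replace with single-char pattern is a character map ----
theorem pv_repl_go_single (x y : Char) : ∀ (l acc : List Char),
    PySem.Chars.replace.go [x] [y] l.length l acc
      = acc.reverse ++ l.map (fun c => if c = x then y else c) := by
  intro l
  induction l with
  | nil => intro acc; simp [PySem.Chars.replace.go]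
  | cons c t ih =>
    intro acc
    simp only [List.length_cons, PySem.Chars.replace.go, List.isPrefixOf, Bool.and_true]
    by_cases h : x = c
    · have hxc : (x == c) = true := by simpa using h
      rw [hxc]
      simp only [if_true, List.length_nil, List.drop_zero, List.drop_succ_cons,
        List.reverse_singleton, List.singleton_append]
      rw [ih (y :: acc)]
      simp [h.symm]
    · have hb : (x == c) = false := by simpa using h
      rw [hb]
      simp only [Bool.false_eq_true, if_false]
      rw [ih (c :: acc)]
      have : ¬ (c = x) := fun hc => h hc.symm
      simp [this]

theorem pv_repl_single (x y : Char) (l : List Char) :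
    PySem.Chars.replace l [x] [y] = l.map (fun c => if c = x then y else c) := by
  simpa [PySem.Chars.replace, List.isEmpty] using pv_repl_go_single x y l []

-- ---- bit-list value ----
theorem pvBtn_foldl (l : List Bool) : ∀ a : Nat,
    l.foldl (fun a b => 2 * a + (if b then 1 else 0)) a = a * 2 ^ l.length + pvBtn l := by
  induction l with
  | nil => intro a; simp [pvBtn]
  | cons b t ih =>
    intro a
    simp only [List.foldl_cons, List.length_cons]
    rw [ih]
    have hb : pvBtn (b :: t) = (if b then 1 else 0) * 2 ^ t.length + pvBtn t := by
      simp only [pvBtn, List.foldl_cons]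
      rw [ih]
      cases b <;> simp [pvBtn]
    rw [hb, pow_succ]
    ring

theorem pvBtn_append (l1 l2 : List Bool) :
    pvBtn (l1 ++ l2) = pvBtn l1 * 2 ^ l2.length + pvBtn l2 := by
  simp only [pvBtn, List.foldl_append]
  exact pvBtn_foldl l2 _

theorem pvBtn_lt (l : List Bool) : pvBtn l < 2 ^ l.length := by
  induction l with
  | nil => simp [pvBtn]
  | cons b t ih =>
    have : pvBtn (b :: t) = (if b then 1 else 0) * 2 ^ t.length + pvBtn t := by
      simp only [pvBtn, List.foldl_cons]
      rw [pvBtn_foldl]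
      cases b <;> simp [pvBtn]
    rw [this]
    simp only [List.length_cons, pow_succ]
    cases b <;> simp <;> omega

-- ---- chunks of 8 ----
theorem pvChunks8_short {α : Type} (l : List α) (h : l.length < 8) : pvChunks8 l = [] := by
  rw [pvChunks8, dif_neg (by omega)]

theorem pvChunks8_cons {α : Type} (c l : List α) (h : c.length = 8) :
    pvChunks8 (c ++ l) = c :: pvChunks8 l := by
  rw [pvChunks8, dif_pos (by simp [h])]
  congr 1
  · rw [← h]; exact List.take_left
  · congr 1; rw [← h]; exact List.drop_left

theorem pvChunks8_map_aux {α β : Type} (f : α → β) : ∀ (n : Nat) (l : List α), l.length ≤ n →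
    pvChunks8 (l.map f) = (pvChunks8 l).map (List.map f) := by
  intro n
  induction n with
  | zero =>
    intro l hl
    have : l = [] := List.eq_nil_of_length_eq_zero (by omega)
    subst this; simp [pvChunks8_short]
  | succ n ih =>
    intro l hl
    by_cases h8 : 8 ≤ l.length
    · have hL : pvChunks8 (l.map f) = (l.map f).take 8 :: pvChunks8 ((l.map f).drop 8) := by
        rw [pvChunks8, dif_pos (by simpa using h8)]
      have hR : pvChunks8 l = l.take 8 :: pvChunks8 (l.drop 8) := by
        rw [pvChunks8, dif_pos h8]
      rw [hL, hR, ← List.map_take, ← List.map_drop, List.map_cons]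
      congr 1
      exact ih (l.drop 8) (by simp; omega)
    · rw [pvChunks8_short _ (by simpa using (by omega : l.length < 8)),
          pvChunks8_short l (by omega)]
      simp

theorem pvChunks8_map {α β : Type} (f : α → β) (l : List α) :
    pvChunks8 (l.map f) = (pvChunks8 l).map (List.map f) :=
  pvChunks8_map_aux f l.length l le_rfl

theorem pvChunks8_length_aux {α : Type} : ∀ (n : Nat) (l : List α), l.length ≤ n →
    ∀ ch ∈ pvChunks8 l, ch.length = 8 := by
  intro n
  induction n with
  | zero =>
    intro l hl ch hch
    have : l = [] := List.eq_nil_of_length_eq_zero (by omega)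
    subst this; rw [pvChunks8_short _ (by simp)] at hch; simp at hch
  | succ n ih =>
    intro l hl ch hch
    by_cases h8 : 8 ≤ l.length
    · rw [pvChunks8, dif_pos h8] at hch
      rcases List.mem_cons.mp hch with h | h
      · subst h; simp [List.length_take]; omega
      · exact ih (l.drop 8) (by simp; omega) ch h
    · rw [pvChunks8_short l (by omega)] at hch; simp at hch


-- ---- per-character / per-value computational facts (closed, checked by evaluation) ----
set_option maxRecDepth 100000 in
theorem pv_F1 : (pvAlphabet.toList.all (fun c =>
    pvABlock c == (pvBits6 (pvAlphabet.toList.idxOf c)).map pvBitChar)) = true := by rfl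

set_option maxRecDepth 100000 in
theorem pv_F2 : (pvAllowed.all (fun c => c == '=' ||
    (decide (pvRepl c ∈ pvAlphabet.toList) && decide (pvAlphabet.toList.idxOf (pvRepl c) < 64)))) = true := by rfl

set_option maxRecDepth 100000 in
theorem pv_F3 : (pvAllowed.all (fun c => c == '=' ||
    pvIndex.getD c 0 == ((pvAlphabet.toList.idxOf (pvRepl c) : Nat) : Int))) = true := by rfl

set_option maxRecDepth 8192 in
theorem pv_F4 : ∀ n ∈ List.range 64, pvBtn (pvBits6 n) = n := by decide

set_option maxRecDepth 100000 in
theorem pv_conv8 : ∀ (a b c d e f g h : Bool),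
    pvConv ([a,b,c,d,e,f,g,h].map pvBitChar) = pvHex2 ((pvBtn [a,b,c,d,e,f,g,h] : Nat) : Int) := by
  decide

theorem pvABlock_eq {c : Char} (h : c ∈ pvAlphabet.toList) :
    pvABlock c = (pvBits6 (pvAlphabet.toList.idxOf c)).map pvBitChar := by
  have h1 := pv_F1
  rw [List.all_eq_true] at h1
  simpa using h1 c h

theorem pvRepl_mem {c : Char} (h : c ∈ pvAllowed) (hne : c ≠ '=') :
    pvRepl c ∈ pvAlphabet.toList ∧ pvAlphabet.toList.idxOf (pvRepl c) < 64 := by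
  have h1 := pv_F2
  rw [List.all_eq_true] at h1
  have h2 := h1 c h
  simpa [hne] using h2

theorem pvIndex_eq {c : Char} (h : c ∈ pvAllowed) (hne : c ≠ '=') :
    pvIndex.getD c 0 = ((pvAlphabet.toList.idxOf (pvRepl c) : Nat) : Int) := by
  have h1 := pv_F3
  rw [List.all_eq_true] at h1
  have h2 := h1 c h
  simpa [hne] using h2

theorem pvBits6_btn {n : Nat} (h : n < 64) : pvBtn (pvBits6 n) = n :=
  pv_F4 n (List.mem_range.mpr h)

theorem pvConv_chunk (ch : List Bool) (h : ch.length = 8) :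
    pvConv (ch.map pvBitChar) = pvHex2 ((pvBtn ch : Nat) : Int) := by
  rcases ch with _ | ⟨a, ch⟩; · simp at h
  rcases ch with _ | ⟨b, ch⟩; · simp at h
  rcases ch with _ | ⟨c, ch⟩; · simp at h
  rcases ch with _ | ⟨d, ch⟩; · simp at h
  rcases ch with _ | ⟨e, ch⟩; · simp at h
  rcases ch with _ | ⟨f, ch⟩; · simp at h
  rcases ch with _ | ⟨g, ch⟩; · simp at h
  rcases ch with _ | ⟨h', ch⟩; · simp at h
  rcases ch with _ | ⟨i, ch⟩
  · exact pv_conv8 a b c d e f g h'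
  · simp at h

-- ---- the two accumulation loops, in closed form ----
theorem pv_ansbin_fold : ∀ (l s : List Char),
    l.foldl (fun s c => if c ≠ '=' then s ++ pvABlock c else s) s
      = s ++ (l.filter (fun c => !(c == '='))).flatMap pvABlock := by
  intro l
  induction l with
  | nil => intro s; simp
  | cons c t ih =>
    intro s
    simp only [List.foldl_cons, List.filter_cons]
    by_cases h : c = '='
    · rw [if_neg (by simp [h]), ih]
      simp [h]
    · rw [if_pos h, ih]
      simp [h, List.append_assoc]

theorem pv_bfold : ∀ (l : List Char) (st : Int × Int × List String),
    l.foldl (fun st ch => if ch = '=' then st else pvBStep st (pvIndex.getD ch 0)) st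
      = ((l.filter (fun c => !(c == '='))).map (fun c => pvIndex.getD c 0)).foldl pvBStep st := by
  intro l
  induction l with
  | nil => intro st; simp
  | cons c t ih =>
    intro st
    simp only [List.foldl_cons, List.filter_cons]
    by_cases h : c = '='
    · rw [if_pos h, ih]
      simp [h]
    · rw [if_neg h, ih]
      simp [h]

-- ---- A's grouping loop produces the 8-chunks ----
theorem pv_group : ∀ (l : List Char) (i0 : Int) (res : List (List Char)) (rp : List Char),
    0 ≤ i0 → PySem.Int.mod i0 8 = (rp.length : Int) →
    ((PySem.List.enumerate l i0).foldl pvAStep (res, rp)).1 = res ++ pvChunks8 (rp ++ l) := by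
  intro l
  induction l with
  | nil =>
    intro i0 res rp h0 hm
    rw [PySem.Int.mod_eq_emod_of_pos (by norm_num)] at hm
    have hlt : rp.length < 8 := by omega
    simp [PySem.List.enumerate_nil, pvChunks8_short rp hlt]
  | cons c t ih =>
    intro i0 res rp h0 hm
    rw [PySem.List.enumerate_cons, List.foldl_cons]
    rw [PySem.Int.mod_eq_emod_of_pos (by norm_num)] at hm
    by_cases hc : rp.length = 7
    · have hcond : PySem.Int.mod (i0 + 1) 8 = 0 := by
        rw [PySem.Int.mod_eq_emod_of_pos (by norm_num)]
        omega
      have hstep : pvAStep (res, rp) (i0, c) = (res ++ [rp ++ [c]], []) := by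
        simp [pvAStep]
        omega
      rw [hstep]
      rw [ih (i0 + 1) (res ++ [rp ++ [c]]) [] (by omega) (by
        rw [PySem.Int.mod_eq_emod_of_pos (by norm_num)]
        simp only [List.length_nil, Nat.cast_zero]
        omega)]
      rw [List.nil_append]
      rw [show rp ++ c :: t = (rp ++ [c]) ++ t by simp]
      rw [pvChunks8_cons (rp ++ [c]) t (by simp [hc])]
      simp
    · have hlt : rp.length < 7 := by omega
      have hcond : ¬ PySem.Int.mod (i0 + 1) 8 = 0 := by
        rw [PySem.Int.mod_eq_emod_of_pos (by norm_num)]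
        omega
      have hstep : pvAStep (res, rp) (i0, c) = (res, rp ++ [c]) := by
        simp [pvAStep]
        omega
      rw [hstep]
      rw [ih (i0 + 1) res (rp ++ [c]) (by omega) (by
        rw [PySem.Int.mod_eq_emod_of_pos (by norm_num)]
        simp only [List.length_append, List.length_cons, List.length_nil]
        push_cast
        omega)]
      simp

-- ---- B's accumulator loop produces the 8-chunks ----
theorem pv_binv : ∀ (vs : List Nat) (rem : List Bool) (out : List String),
    (∀ v ∈ vs, v < 64) → rem.length < 8 →
    ((vs.map (Nat.cast : Nat → Int)).foldl pvBStep
        (((pvBtn rem : Nat) : Int), ((rem.length : Nat) : Int), out)).2.2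
      = out ++ (pvChunks8 (rem ++ vs.flatMap pvBits6)).map (fun ch => pvHex2 ((pvBtn ch : Nat) : Int)) := by
  intro vs
  induction vs with
  | nil =>
    intro rem out _ hr
    simp [pvChunks8_short rem hr]
  | cons v t ih =>
    intro rem out h64 hr
    have hv : v < 64 := h64 v (by simp)
    rw [List.map_cons, List.foldl_cons]
    have hlen6 : (pvBits6 v).length = 6 := by simp [pvBits6]
    have haccN : pvBtn (rem ++ pvBits6 v) = pvBtn rem * 64 + v := by
      rw [pvBtn_append, hlen6, pvBits6_btn hv]
      norm_num
    by_cases hb : (8 : Int) ≤ ((rem.length : Nat) : Int) + 6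
    · -- a byte is emitted
      have hr2 : 2 ≤ rem.length := by omega
      set rem' : List Bool := rem ++ pvBits6 v with hrem'
      have hlen' : rem'.length = rem.length + 6 := by simp [hrem', hlen6]
      have htake : (rem'.take 8).length = 8 := by rw [List.length_take, hlen']; omega
      have hdrop : (rem'.drop 8).length = rem.length - 2 := by rw [List.length_drop, hlen']; omega
      have hN : pvBtn rem' = pvBtn (rem'.take 8) * 2 ^ (rem.length - 2) + pvBtn (rem'.drop 8) := by
        rw [show pvBtn rem' = pvBtn (rem'.take 8 ++ rem'.drop 8) by rw [List.take_append_drop]]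
        rw [pvBtn_append, hdrop]
      have hltd : pvBtn (rem'.drop 8) < 2 ^ (rem.length - 2) := by
        have := pvBtn_lt (rem'.drop 8); rwa [hdrop] at this
      have h2 : 0 < 2 ^ (rem.length - 2) := pow_pos (by norm_num) _
      have hdiv : pvBtn rem' / 2 ^ (rem.length - 2) = pvBtn (rem'.take 8) := by
        rw [hN, mul_comm, Nat.mul_add_div h2, Nat.div_eq_of_lt hltd, Nat.add_zero]
      have hmod : pvBtn rem' % 2 ^ (rem.length - 2) = pvBtn (rem'.drop 8) := by
        rw [hN]
        rw [Nat.mul_add_mod']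
        exact Nat.mod_eq_of_lt hltd
      have hargs : ((pvBtn rem : Nat) : Int) * 64 + ((v : Nat) : Int)
          = ((pvBtn rem' : Nat) : Int) := by
        rw [haccN]; push_cast; ring
      have hk : ((((rem.length : Nat) : Int) + 6 - 8).toNat) = rem.length - 2 := by omega
      have h2k : ((2 : Int) ^ (rem.length - 2)) = (((2 ^ (rem.length - 2) : Nat)) : Int) := by
        push_cast; ring
      have hstep : pvBStep (((pvBtn rem : Nat) : Int), ((rem.length : Nat) : Int), out)
            ((v : Nat) : Int)
          = (((pvBtn (rem'.drop 8) : Nat) : Int), (((rem'.drop 8).length : Nat) : Int),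
             out ++ [pvHex2 ((pvBtn (rem'.take 8) : Nat) : Int)]) := by
        simp only [pvBStep, if_pos hb]
        refine Prod.ext ?_ (Prod.ext ?_ ?_)
        · show PySem.Int.mod (((pvBtn rem : Nat) : Int) * 64 + ((v : Nat) : Int))
              (2 ^ ((((rem.length : Nat) : Int) + 6 - 8).toNat)) = _
          rw [hargs, hk, h2k, PySem.Int.mod_natCast, hmod]
        · show ((rem.length : Nat) : Int) + 6 - 8 = _
          rw [hdrop]; push_cast; omega
        · show out ++ [pvHex2 (PySem.Int.floordiv
              (((pvBtn rem : Nat) : Int) * 64 + ((v : Nat) : Int))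
              (2 ^ ((((rem.length : Nat) : Int) + 6 - 8).toNat)))] = _
          congr 2
          rw [hargs, hk, h2k]
          rw [PySem.Int.floordiv_eq_ediv_of_pos (by positivity)]
          rw [← Int.natCast_div, hdiv]
      rw [hstep]
      rw [ih (rem'.drop 8) (out ++ [pvHex2 ((pvBtn (rem'.take 8) : Nat) : Int)])
          (fun w hw => h64 w (by simp [hw]))
          (by rw [hdrop]; omega)]
      rw [List.flatMap_cons]
      rw [show rem ++ (pvBits6 v ++ t.flatMap pvBits6) = rem'.take 8 ++ (rem'.drop 8 ++ t.flatMap pvBits6) by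
        rw [← List.append_assoc, ← hrem', ← List.append_assoc, List.take_append_drop]]
      rw [pvChunks8_cons (rem'.take 8) _ htake]
      simp [List.append_assoc]
    · -- no byte emitted
      have hstep : pvBStep (((pvBtn rem : Nat) : Int), ((rem.length : Nat) : Int), out)
            ((v : Nat) : Int)
          = (((pvBtn (rem ++ pvBits6 v) : Nat) : Int),
             (((rem ++ pvBits6 v).length : Nat) : Int), out) := by
        simp only [pvBStep, if_neg hb]
        refine Prod.ext ?_ (Prod.ext ?_ rfl)
        · show ((pvBtn rem : Nat) : Int) * 64 + ((v : Nat) : Int) = _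
          rw [haccN]; push_cast; ring
        · show ((rem.length : Nat) : Int) + 6 = _
          simp [hlen6]
      rw [hstep]
      rw [ih (rem ++ pvBits6 v) out (fun w hw => h64 w (by simp [hw]))
          (by simp [hlen6]; omega)]
      rw [List.flatMap_cons, List.append_assoc]

theorem pv_slice_pad (l : List Char) (cnt : Int) (h : 0 ≤ cnt) :
    PySem.List.slice (l ++ List.replicate (cnt.toNat * 2) '0') none
      (some (((l ++ List.replicate (cnt.toNat * 2) '0').length : Int) - cnt * 2)) = l := by
  have hlen : ((l ++ List.replicate (cnt.toNat * 2) '0').length : Int) - cnt * 2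
      = (l.length : Int) := by
    simp only [List.length_append, List.length_replicate]
    push_cast
    omega
  rw [hlen, PySem.List.slice_to (l ++ List.replicate (cnt.toNat * 2) '0')
    (b := (l.length : Int)) (by exact_mod_cast Nat.zero_le _), Int.toNat_natCast]
  exact List.take_left

theorem pv_fun_repl : ((fun c => if c = '/' then '_' else c) ∘ (fun c => if c = '+' then '-' else c)) = pvRepl := by
  funext c
  by_cases h1 : c = '+'
  · subst h1; simp [pvRepl]
  · by_cases h2 : c = '/'
    · subst h2; simp [pvRepl]
    · simp [pvRepl, h1, h2]

theorem pv_filter_repl : ((fun c => !(c == '=')) ∘ pvRepl) = (fun c => !(c == '=')) := by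
  funext c
  by_cases h1 : c = '+'
  · subst h1; rfl
  · by_cases h2 : c = '/'
    · subst h2; rfl
    · simp [pvRepl, h1, h2]

theorem pv_A_eq (base : String) (hpre : Pre_base64_to_bytes base) :
    base64_to_bytes base = pvClosed base.toList := by
  have hpre' : ∀ c ∈ base.toList, c ∈ pvAllowed := by
    rw [Pre_base64_to_bytes, List.all_eq_true] at hpre
    intro c hc
    simpa using hpre c hc
  have hrepl : (PySem.Str.replace (PySem.Str.replace base "+" "-") "/" "_").toList
      = base.toList.map pvRepl := by
    rw [PySem.Str.toList_replace, PySem.Str.toList_replace]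
    rw [show ("+" : String).toList = ['+'] from rfl, show ("-" : String).toList = ['-'] from rfl,
        show ("/" : String).toList = ['/'] from rfl, show ("_" : String).toList = ['_'] from rfl]
    rw [pv_repl_single, pv_repl_single, List.map_map, pv_fun_repl]
  simp only [base64_to_bytes]
  rw [hrepl]
  rw [pv_ansbin_fold, List.nil_append]
  rw [List.filter_map, pv_filter_repl, List.flatMap_map]
  have hflat : ∀ c ∈ base.toList.filter (fun c => !(c == '=')),
      pvABlock (pvRepl c) = (pvBits6 (pvAlphabet.toList.idxOf (pvRepl c))).map pvBitChar := by
    intro c hc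
    have hmem := List.mem_of_mem_filter hc
    have hne : c ≠ '=' := by simpa using List.of_mem_filter hc
    exact pvABlock_eq (pvRepl_mem (hpre' c hmem) hne).1
  rw [List.flatMap_congr hflat]
  rw [show (fun c => (pvBits6 (pvAlphabet.toList.idxOf (pvRepl c))).map pvBitChar)
      = (fun c => ((fun n => pvBits6 n) ((fun c => pvAlphabet.toList.idxOf (pvRepl c)) c)).map pvBitChar) from rfl]
  rw [← List.map_flatMap]
  rw [pv_slice_pad _ _ (PySem.Int.mod_nonneg _ (by norm_num))]
  rw [pv_group _ 0 [] [] le_rfl (by decide), List.nil_append, List.nil_append]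
  rw [pvChunks8_map, List.map_map]
  rw [pvClosed, pvVals, List.flatMap_map]
  refine List.map_congr_left ?_
  intro ch hch
  have hlen : ch.length = 8 := pvChunks8_length_aux _ _ le_rfl ch hch
  exact pvConv_chunk ch hlen

theorem pv_B_eq (base : String) (hpre : Pre_base64_to_bytes base) :
    base64_to_bytes_alt base = pvClosed base.toList := by
  have hpre' : ∀ c ∈ base.toList, c ∈ pvAllowed := by
    rw [Pre_base64_to_bytes, List.all_eq_true] at hpre
    intro c hc
    simpa using hpre c hc
  simp only [base64_to_bytes_alt]
  rw [pv_bfold]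
  have hmapeq : (base.toList.filter (fun c => !(c == '='))).map (fun c => pvIndex.getD c 0)
      = (pvVals base.toList).map (Nat.cast : Nat → Int) := by
    rw [pvVals, List.map_map]
    refine List.map_congr_left ?_
    intro c hc
    have hmem := List.mem_of_mem_filter hc
    have hne : c ≠ '=' := by simpa using List.of_mem_filter hc
    exact pvIndex_eq (hpre' c hmem) hne
  rw [hmapeq]
  have h64 : ∀ v ∈ pvVals base.toList, v < 64 := by
    intro v hv
    rw [pvVals] at hv
    obtain ⟨c, hc, rfl⟩ := List.mem_map.mp hv
    have hmem := List.mem_of_mem_filter hc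
    have hne : c ≠ '=' := by simpa using List.of_mem_filter hc
    exact (pvRepl_mem (hpre' c hmem) hne).2
  have hmain := pv_binv (pvVals base.toList) [] [] h64 (by simp)
  simpa [pvClosed] using hmain

-- ===== VERDICT (by name: the statement is the Claim_ definition above) =====
theorem base64_to_bytes_spec : Claim_equal_base64_to_bytes := by
  intro base _hdom hpre
  unfold Spec_base64_to_bytes
  rw [pv_A_eq base hpre, pv_B_eq base hpre]
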